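-- pv_equiv track=rewrite | github.com/miranov25/RootInteractive | RootInteractive/Tools/generators/generate_ao2d_fixture.py | cross_table_filter
-- ===== SOURCE A (Python) =====
-- def cross_table_filter(offsets_or_starts, indices_or_counts, selected_parents,
--                        child_count, is_csr=True):
--     """
--     Compute child include-mask from parent selection.
--
--     Returns list of int (0/1), length = child_count.
--     """
--     mask = [0] * child_count
--     for p in selected_parents:
--         if is_csr:
--             for j in range(offsets_or_starts[p], offsets_or_starts[p + 1]):
--                 mask[indices_or_counts[j]] = 1
--         else:
--             s = offsets_or_starts[p]
--             c = indices_or_counts[p]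
--             for j in range(s, s + c):
--                 mask[j] = 1
--     return mask
-- ===== SOURCE B (Python) =====
-- def cross_table_filter(offsets_or_starts, indices_or_counts, selected_parents,
--                        child_count, is_csr=True):
--     hits = []
--     for p in selected_parents:
--         if is_csr:
--             hits.extend(indices_or_counts[offsets_or_starts[p]:offsets_or_starts[p + 1]])
--         else:
--             s = offsets_or_starts[p]
--             hits.extend(range(s, s + indices_or_counts[p]))
--     mask = []
--     prev = 0
--     for q in sorted(set(hits)):
--         mask.extend([0] * (q - prev))
--         mask.append(1)
--         prev = q + 1
--     mask.extend([0] * (child_count - prev))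
--     return mask
-- ===== Notes on version B (the rewrite author's own statement) =====
-- stated objective: alternative
-- what changed: B replaces A's scattered in-place bit writes into a preallocated mask by a sort-then-emit algorithm: it flattens all hit child indices, sorts the distinct ones, and constructs the mask sequentially as runs of zeros punctuated by ones (plus a final zero run), never indexing into the output.
-- outside the precondition, e.g. on cross_table_filter([0, 1], [-1], [0], 3, True): A returns [0, 0, 1], B returns [1, 0, 0, 0]
import Mathlib
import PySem

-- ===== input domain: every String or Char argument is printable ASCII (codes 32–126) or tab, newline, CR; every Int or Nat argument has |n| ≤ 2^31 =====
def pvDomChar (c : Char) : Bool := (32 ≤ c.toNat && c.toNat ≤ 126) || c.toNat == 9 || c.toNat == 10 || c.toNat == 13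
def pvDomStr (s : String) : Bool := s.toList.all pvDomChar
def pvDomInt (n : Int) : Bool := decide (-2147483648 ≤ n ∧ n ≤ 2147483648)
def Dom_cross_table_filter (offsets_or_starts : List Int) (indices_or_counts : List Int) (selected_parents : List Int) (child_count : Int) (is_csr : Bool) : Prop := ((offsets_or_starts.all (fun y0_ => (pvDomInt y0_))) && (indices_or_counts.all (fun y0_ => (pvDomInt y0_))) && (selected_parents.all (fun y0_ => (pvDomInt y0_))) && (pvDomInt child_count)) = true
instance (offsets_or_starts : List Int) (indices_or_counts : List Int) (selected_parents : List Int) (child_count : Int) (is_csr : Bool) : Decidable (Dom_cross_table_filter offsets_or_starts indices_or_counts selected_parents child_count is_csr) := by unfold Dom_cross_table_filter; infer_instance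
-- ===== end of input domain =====

-- B replaces A's scattered in-place bit writes by a sort-then-emit construction: flatten the hit
-- child indices, sort the distinct ones, and emit the mask as runs of zeros punctuated by ones
-- (objective: alternative — same order of cost, different algorithmic shape).

-- ===== PORT A =====
def cross_table_filter (offsets_or_starts : List Int) (indices_or_counts : List Int) (selected_parents : List Int) (child_count : Int) (is_csr : Bool) : List Int :=
  let mask : List Int := List.replicate child_count.toNat 0
  selected_parents.foldl (fun mask p =>
    if is_csr then
      (PySem.List.pyRange (PySem.List.pyGetD offsets_or_starts p 0)
          (PySem.List.pyGetD offsets_or_starts (p + 1) 0) 1).foldl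
        (fun mask j => PySem.List.pySetD mask (PySem.List.pyGetD indices_or_counts j 0) 1) mask
    else
      let s := PySem.List.pyGetD offsets_or_starts p 0
      let c := PySem.List.pyGetD indices_or_counts p 0
      (PySem.List.pyRange s (s + c) 1).foldl (fun mask j => PySem.List.pySetD mask j 1) mask) mask

-- ===== PORT B =====
def cross_table_filter_alt (offsets_or_starts : List Int) (indices_or_counts : List Int) (selected_parents : List Int) (child_count : Int) (is_csr : Bool) : List Int :=
  let hits : List Int := selected_parents.foldl (fun acc p =>
    acc ++ (if is_csr then
        PySem.List.slice indices_or_counts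
          (some (PySem.List.pyGetD offsets_or_starts p 0))
          (some (PySem.List.pyGetD offsets_or_starts (p + 1) 0))
      else
        let s := PySem.List.pyGetD offsets_or_starts p 0
        PySem.List.pyRange s (s + PySem.List.pyGetD indices_or_counts p 0) 1)) []
  let r := (PySem.List.sorted (PySem.Set.ofList hits) (fun x => x) false).foldl
      (fun (mp : List Int × Int) q =>
        (mp.1 ++ List.replicate (q - mp.2).toNat 0 ++ [1], q + 1)) ([], 0)
  r.1 ++ List.replicate (child_count - r.2).toNat 0

-- ===== PRECONDITION & SPEC =====
-- Pre_ restricts to the function's natural domain: each selected parent indexes the offset/count tables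
-- in range, CSR offset pairs are non-negative and within the indices table, and every reachable child
-- index lies in [0, child_count); outside it A raises IndexError, or negative offsets / child indices
-- make A wrap while B slices from the end (see the cited excluded examples).
def Pre_cross_table_filter (offsets_or_starts : List Int) (indices_or_counts : List Int) (selected_parents : List Int) (child_count : Int) (is_csr : Bool) : Prop :=
  ∀ p ∈ selected_parents,
    if is_csr then
      PySem.Raise.InRange offsets_or_starts.length p ∧
      PySem.Raise.InRange offsets_or_starts.length (p + 1) ∧
      0 ≤ PySem.List.pyGetD offsets_or_starts p 0 ∧
      0 ≤ PySem.List.pyGetD offsets_or_starts (p + 1) 0 ∧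
      PySem.List.pyGetD offsets_or_starts (p + 1) 0 ≤ (indices_or_counts.length : Int) ∧
      ∀ j ∈ PySem.List.pyRange (PySem.List.pyGetD offsets_or_starts p 0)
              (PySem.List.pyGetD offsets_or_starts (p + 1) 0) 1,
        0 ≤ PySem.List.pyGetD indices_or_counts j 0 ∧
        PySem.List.pyGetD indices_or_counts j 0 < child_count
    else
      PySem.Raise.InRange offsets_or_starts.length p ∧
      PySem.Raise.InRange indices_or_counts.length p ∧
      ∀ j ∈ PySem.List.pyRange (PySem.List.pyGetD offsets_or_starts p 0)
              (PySem.List.pyGetD offsets_or_starts p 0 + PySem.List.pyGetD indices_or_counts p 0) 1,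
        0 ≤ j ∧ j < child_count
instance (offsets_or_starts : List Int) (indices_or_counts : List Int) (selected_parents : List Int) (child_count : Int) (is_csr : Bool) : Decidable (Pre_cross_table_filter offsets_or_starts indices_or_counts selected_parents child_count is_csr) := by unfold Pre_cross_table_filter; infer_instance

def pvWitness_cross_table_filter : List Int × List Int × List Int × Int × Bool :=
  ([0, 2, 3], [0, 1, 2], [1], 3, true)

def Spec_cross_table_filter (offsets_or_starts : List Int) (indices_or_counts : List Int) (selected_parents : List Int) (child_count : Int) (is_csr : Bool) (out : List Int) : Prop := out = cross_table_filter_alt offsets_or_starts indices_or_counts selected_parents child_count is_csr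
instance (offsets_or_starts : List Int) (indices_or_counts : List Int) (selected_parents : List Int) (child_count : Int) (is_csr : Bool) (out : List Int) : Decidable (Spec_cross_table_filter offsets_or_starts indices_or_counts selected_parents child_count is_csr out) := by unfold Spec_cross_table_filter; infer_instance

-- ===== CLAIM (what is proved, stated in full; the proofs are below) =====
def Claim_equal_cross_table_filter : Prop := ∀ (offsets_or_starts : List Int) (indices_or_counts : List Int) (selected_parents : List Int) (child_count : Int) (is_csr : Bool), Dom_cross_table_filter offsets_or_starts indices_or_counts selected_parents child_count is_csr → Pre_cross_table_filter offsets_or_starts indices_or_counts selected_parents child_count is_csr → Spec_cross_table_filter offsets_or_starts indices_or_counts selected_parents child_count is_csr (cross_table_filter offsets_or_starts indices_or_counts selected_parents child_count is_csr)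

-- ===== LEMMAS AND PROOFS =====

-- the child indices contributed by one selected parent, as A gathers them (element by element)
def pvPos (offsets_or_starts : List Int) (indices_or_counts : List Int) (is_csr : Bool) (p : Int) : List Int :=
  if is_csr then
    (PySem.List.pyRange (PySem.List.pyGetD offsets_or_starts p 0)
        (PySem.List.pyGetD offsets_or_starts (p + 1) 0) 1).map
      (fun j => PySem.List.pyGetD indices_or_counts j 0)
  else
    PySem.List.pyRange (PySem.List.pyGetD offsets_or_starts p 0)
      (PySem.List.pyGetD offsets_or_starts p 0 + PySem.List.pyGetD indices_or_counts p 0) 1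

theorem pv_foldl_flatMap {α β γ : Type} (f : α → List β) (g : γ → β → γ) (sel : List α) (init : γ) :
    (sel.flatMap f).foldl g init = sel.foldl (fun acc p => (f p).foldl g acc) init := by
  induction sel generalizing init with
  | nil => rfl
  | cons p rest ih => simp [List.flatMap_cons, List.foldl_append, ih]

-- A's nested fold is the fold of the flattened child-index list
theorem pv_A_eq_flat (offs inds sel : List Int) (cc : Int) (csr : Bool) :
    cross_table_filter offs inds sel cc csr =
      (sel.flatMap (pvPos offs inds csr)).foldl
        (fun m j => PySem.List.pySetD m j 1) (List.replicate cc.toNat 0) := by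
  rw [pv_foldl_flatMap]
  unfold cross_table_filter
  apply PySem.List.foldl_congr_mem
  intro m p _
  unfold pvPos
  cases csr <;> simp [List.foldl_map]

-- under Pre_'s bounds, B's CSR slice is exactly A's element-by-element gather
theorem pv_slice_eq_map (xs : List Int) (a b : Int) (ha : 0 ≤ a) (hb : 0 ≤ b)
    (hbl : b ≤ (xs.length : Int)) :
    PySem.List.slice xs (some a) (some b) =
      (PySem.List.pyRange a b 1).map (fun j => PySem.List.pyGetD xs j 0) := by
  rw [PySem.List.slice_toNat xs ha hb, PySem.List.pyRange_one]
  by_cases h : b ≤ a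
  · have h1 : (b - a).toNat = 0 := by omega
    have h2 : b.toNat - a.toNat = 0 := by omega
    simp [h1, h2]
  · apply List.ext_getElem
    · simp; omega
    · intro k h1 h2
      have hk : k < (b - a).toNat := by simpa using h2
      have hkl : a.toNat + k < xs.length := by omega
      simp only [List.getElem_take, List.getElem_drop, List.getElem_map, List.getElem_range]
      rw [PySem.List.pyGetD_of_nonneg _ _ (by omega : (0:Int) ≤ a + (k:Int))]
      have hcast : (a + (k : Int)).toNat = a.toNat + k := by omega
      rw [hcast]
      simp [List.getD_eq_getElem?_getD, List.getElem?_eq_getElem hkl]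

-- what a fold of in-place writes produces, element by element
theorem pv_mark_getElem? (ps : List Int) (m : List Int)
    (hps : ∀ x ∈ ps, 0 ≤ x ∧ x < (m.length : Int)) (i : Nat) :
    (ps.foldl (fun m j => PySem.List.pySetD m j 1) m)[i]? =
      if (i : Int) ∈ ps then some 1 else m[i]? := by
  induction ps generalizing m with
  | nil => simp
  | cons x rest ih =>
    have hx := hps x (by simp)
    have hlen : (PySem.List.pySetD m x 1).length = m.length := PySem.List.length_pySetD _ _ _
    simp only [List.foldl_cons]
    rw [ih _ (fun y hy => by have := hps y (by simp [hy]); omega)]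
    rw [PySem.List.pySetD_of_nonneg _ _ hx.1]
    by_cases hmem : (i : Int) ∈ rest
    · simp [hmem]
    · by_cases hxi : x = (i : Int)
      · have hnat : x.toNat = i := by omega
        simp [hmem, hxi, show i < m.length by omega]
      · have hne : x.toNat ≠ i := by omega
        have hix : ¬ ((i : Int) = x) := fun hh => hxi hh.symm
        simp [hmem, hix, hne]

theorem pv_positions_bounds (offs inds sel : List Int) (cc : Int) (csr : Bool)
    (hpre : Pre_cross_table_filter offs inds sel cc csr) :
    ∀ x ∈ sel.flatMap (pvPos offs inds csr), 0 ≤ x ∧ x < cc := by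
  intro x hx
  rw [List.mem_flatMap] at hx
  obtain ⟨p, hp, hxp⟩ := hx
  have h := hpre p hp
  unfold pvPos at hxp
  cases csr with
  | false =>
    simp only [Bool.false_eq_true, reduceIte] at hxp h
    exact h.2.2 x hxp
  | true =>
    simp only [reduceIte] at hxp h
    rw [List.mem_map] at hxp
    obtain ⟨j, hj, rfl⟩ := hxp
    exact h.2.2.2.2.2 j hj

-- under Pre_, B's flattened hit list is exactly A's flattened child-index list
theorem pv_hits_eq_flat (offs inds sel : List Int) (cc : Int) (csr : Bool)
    (hpre : Pre_cross_table_filter offs inds sel cc csr) :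
    sel.flatMap (fun p =>
      if csr then
        PySem.List.slice inds (some (PySem.List.pyGetD offs p 0))
          (some (PySem.List.pyGetD offs (p + 1) 0))
      else
        PySem.List.pyRange (PySem.List.pyGetD offs p 0)
          (PySem.List.pyGetD offs p 0 + PySem.List.pyGetD inds p 0) 1) =
    sel.flatMap (pvPos offs inds csr) := by
  induction sel with
  | nil => rfl
  | cons p rest ih =>
    have h := hpre p (by simp)
    have hrest : Pre_cross_table_filter offs inds rest cc csr :=
      fun q hq => hpre q (by simp [hq])
    simp only [List.flatMap_cons, ih hrest]
    congr 1
    unfold pvPos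
    cases csr with
    | false => simp
    | true =>
      simp only [reduceIte] at h ⊢
      exact pv_slice_eq_map inds _ _ h.2.2.1 h.2.2.2.1 h.2.2.2.2.1

-- the mask B emits for the sorted distinct hits, as one recursive segment build
def pvSegMask (prev cc : Int) (qs : List Int) : List Int :=
  match qs with
  | [] => List.replicate (cc - prev).toNat 0
  | q :: rest => List.replicate (q - prev).toNat 0 ++ 1 :: pvSegMask (q + 1) cc rest

-- B's emit loop plus its final zero run is the segment build
theorem pv_fold_seg (qs : List Int) (m0 : List Int) (prev cc : Int) :
    (qs.foldl (fun (mp : List Int × Int) q =>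
        (mp.1 ++ List.replicate (q - mp.2).toNat 0 ++ [1], q + 1)) (m0, prev)).1 ++
      List.replicate ((cc - (qs.foldl (fun (mp : List Int × Int) q =>
        (mp.1 ++ List.replicate (q - mp.2).toNat 0 ++ [1], q + 1)) (m0, prev)).2).toNat) 0 =
    m0 ++ pvSegMask prev cc qs := by
  induction qs generalizing m0 prev with
  | nil => simp [pvSegMask]
  | cons q rest ih =>
    simp only [List.foldl_cons]
    rw [ih]
    simp [pvSegMask]

-- elementwise value of the segment build, for strictly increasing in-range hits
theorem pv_segMask_getElem? (qs : List Int) (prev cc : Int) (i : Nat)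
    (hs : qs.Pairwise (· < ·)) (hlo : ∀ q ∈ qs, prev ≤ q) (hhi : ∀ q ∈ qs, q < cc) :
    (pvSegMask prev cc qs)[i]? =
      if (i : Int) < cc - prev then some (if (prev + (i : Int)) ∈ qs then 1 else 0) else none := by
  induction qs generalizing prev i with
  | nil =>
    simp only [pvSegMask, List.getElem?_replicate, List.not_mem_nil, if_false]
    by_cases h : i < (cc - prev).toNat
    · rw [if_pos h, if_pos (by omega)]
    · rw [if_neg h, if_neg (by omega)]
  | cons q rest ih =>
    have hq : prev ≤ q := hlo q (by simp)
    have hqc : q < cc := hhi q (by simp)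
    have hrest_gt : ∀ r ∈ rest, q < r := fun r hr => (List.pairwise_cons.mp hs).1 r hr
    simp only [pvSegMask]
    by_cases h1 : i < (q - prev).toNat
    · rw [List.getElem?_append_left (by simp; omega)]
      have hni : (prev + (i : Int)) ∉ q :: rest := by
        intro hmem
        rcases List.mem_cons.mp hmem with h | h
        · omega
        · have := hrest_gt _ h; omega
      rw [List.getElem?_replicate, if_pos h1, if_neg hni,
          if_pos (show ((i : Nat) : Int) < cc - prev by omega)]
    · rw [List.getElem?_append_right (by simp; omega)]
      simp only [List.length_replicate]
      by_cases h2 : i = (q - prev).toNat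
      · subst h2
        simp only [Nat.sub_self, List.getElem?_cons_zero]
        have hmemq : prev + (((q - prev).toNat : Nat) : Int) = q := by omega
        have hmem : (prev + (((q - prev).toNat : Nat) : Int)) ∈ q :: rest := by
          rw [hmemq]; exact List.mem_cons_self
        rw [if_pos (show (((q - prev).toNat : Nat) : Int) < cc - prev by omega), if_pos hmem]
      · have hgt : (q - prev).toNat < i := by omega
        have hidx : i - (q - prev).toNat = (i - (q - prev).toNat - 1) + 1 := by omega
        rw [hidx]
        simp only [List.getElem?_cons_succ]
        have hs' : rest.Pairwise (· < ·) := (List.pairwise_cons.mp hs).2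
        have hlo' : ∀ r ∈ rest, q + 1 ≤ r := fun r hr => by have := hrest_gt r hr; omega
        have hhi' : ∀ r ∈ rest, r < cc := fun r hr => hhi r (by simp [hr])
        rw [ih (q + 1) (i - (q - prev).toNat - 1) hs' hlo' hhi']
        have heq : (q + 1 + ((i - (q - prev).toNat - 1 : Nat) : Int)) = prev + (i : Int) := by omega
        by_cases hc : (i : Int) < cc - prev
        · rw [if_pos (show ((i - (q - prev).toNat - 1 : Nat) : Int) < cc - (q + 1) by omega), if_pos hc, heq]
          have hiff : ((prev + (i : Int)) ∈ q :: rest) ↔ (prev + (i : Int)) ∈ rest := by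
            constructor
            · intro h; rcases List.mem_cons.mp h with h | h
              · omega
              · exact h
            · intro h; exact List.mem_cons_of_mem _ h
          simp only [hiff]
        · rw [if_neg (show ¬ ((i - (q - prev).toNat - 1 : Nat) : Int) < cc - (q + 1) by omega), if_neg hc]

-- ===== VERDICT (by name: the statement is the Claim_ definition above) =====
theorem cross_table_filter_spec : Claim_equal_cross_table_filter := by
  intro offs inds sel cc csr _ hpre
  unfold Spec_cross_table_filter
  rw [pv_A_eq_flat]
  simp only [cross_table_filter_alt]
  rw [PySem.List.foldl_append_eq_flatMap, List.nil_append,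
      pv_hits_eq_flat offs inds sel cc csr hpre]
  set ps := sel.flatMap (pvPos offs inds csr) with hps
  set qs := PySem.List.sorted (PySem.Set.ofList ps) (fun x => x) false with hqs
  rw [pv_fold_seg qs [] 0 cc, List.nil_append]
  have hbd := pv_positions_bounds offs inds sel cc csr hpre
  have hmemqs : ∀ x : Int, x ∈ qs ↔ x ∈ ps := by
    intro x; rw [hqs, PySem.List.mem_sorted, PySem.Set.mem_ofList]
  have hsorted : qs.Pairwise (· < ·) := PySem.List.sorted_ofList_pairwise_lt ps
  apply List.ext_getElem?
  intro i
  have hbd' : ∀ x ∈ ps, 0 ≤ x ∧ x < ((List.replicate cc.toNat (0:Int)).length : Int) := by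
    intro x hx; have := hbd x hx; simp only [List.length_replicate]; omega
  rw [pv_mark_getElem? ps _ hbd' i,
      pv_segMask_getElem? qs 0 cc i hsorted
        (fun q hq => (hbd q ((hmemqs q).mp hq)).1)
        (fun q hq => (hbd q ((hmemqs q).mp hq)).2)]
  simp only [zero_add, sub_zero]
  by_cases hm : (i : Int) ∈ ps
  · have hlt : (i : Int) < cc := (hbd _ hm).2
    rw [if_pos hm, if_pos (by omega), if_pos ((hmemqs _).mpr hm)]
  · have hnq : (i : Int) ∉ qs := fun h => hm ((hmemqs _).mp h)
    rw [if_neg hm, List.getElem?_replicate]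
    by_cases hc : i < cc.toNat
    · rw [if_pos hc, if_pos (by omega), if_neg hnq]
    · rw [if_neg hc, if_neg (by omega)]
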